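-- pv_equiv track=rewrite | github.com/haidarRA/ETS-Kriptografi-B-4-Mini-AES | avalanche_analysis.py | flip_bit
-- ===== SOURCE A (Python) =====
-- def flip_bit(hex_str, position):
--     # Konversi hex string ke bit string
--     bit_string = ""
--     for c in hex_str:
--         # Konversi setiap karakter hex ke 4 bit
--         bits = bin(int(c, 16))[2:].zfill(4)
--         bit_string += bits
--
--     # Flip bit pada posisi yang ditentukan
--     bit_list = list(bit_string)
--     bit_list[position] = '1' if bit_list[position] == '0' else '0'
--     new_bit_string = ''.join(bit_list)
--
--     # Konversi kembali ke hex string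
--     new_hex = ""
--     for i in range(0, len(new_bit_string), 4):
--         nibble = new_bit_string[i:i+4]
--         hex_char = hex(int(nibble, 2))[2:]
--         new_hex += hex_char
--
--     return new_hex.upper()
-- ===== SOURCE B (Python) =====
-- def flip_bit(hex_str, position):
--     # Work on nibble values instead of a bit string: flip the bit arithmetically.
--     nibbles = [int(c, 16) for c in hex_str]
--     nibbles[position // 4] ^= 1 << (3 - position % 4)
--     return ''.join(format(x, 'X') for x in nibbles)
-- ===== Notes on version B (the rewrite author's own statement) =====
-- stated objective: idiomatic
-- what changed: B replaces A's build-a-bit-string / edit-one-char / re-parse-each-nibble pipeline by a list of nibble integers whose target bit is flipped arithmetically with XOR (nibbles[position//4] ^= 1 << (3 - position%4)); no bit string is ever built.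
import Mathlib
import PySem

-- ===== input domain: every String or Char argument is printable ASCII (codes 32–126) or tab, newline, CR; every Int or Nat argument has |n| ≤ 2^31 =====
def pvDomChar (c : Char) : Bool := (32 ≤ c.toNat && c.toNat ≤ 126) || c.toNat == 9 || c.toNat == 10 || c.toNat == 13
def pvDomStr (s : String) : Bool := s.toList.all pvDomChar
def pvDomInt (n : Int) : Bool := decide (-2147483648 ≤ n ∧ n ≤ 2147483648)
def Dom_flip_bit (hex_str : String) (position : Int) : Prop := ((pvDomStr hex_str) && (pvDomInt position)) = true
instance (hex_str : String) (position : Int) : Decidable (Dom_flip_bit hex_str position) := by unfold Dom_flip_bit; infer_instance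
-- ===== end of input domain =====

-- B flips the target bit arithmetically (XOR) on a list of nibble values instead of building,
-- editing and re-parsing a bit string (objective: idiomatic; same asymptotic cost).

-- ===== PORT A =====
-- int(c, 16) for one character; 0 where Python raises ValueError (those inputs are excluded by Pre_flip_bit)
def pyHexVal (c : Char) : Nat := ((PySem.Int.ofCharsBase? [c] 16).getD 0).toNat

def flip_bit (hex_str : String) (position : Int) : String :=
  -- bit_string = "";  for c in hex_str: bit_string += bin(int(c,16))[2:].zfill(4)
  let bit_string : List Char :=
    hex_str.toList.foldl
      (fun acc c => acc ++ PySem.Chars.zfill (PySem.Int.toBinChars ((pyHexVal c : Nat) : Int)) 4) []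
  -- bit_list[position] = '1' if bit_list[position] == '0' else '0'
  let new_bit_string : List Char :=
    match PySem.List.pyGet? bit_string position with
    | none => bit_string      -- IndexError: excluded by Pre_flip_bit
    | some b => PySem.List.pySetD bit_string position (if b = '0' then '1' else '0')
  -- for i in range(0, len(new_bit_string), 4): new_hex += hex(int(new_bit_string[i:i+4], 2))[2:]
  -- hex(v)[2:] is one digit, Nat.digitChar v: exact since a ≤4-char chunk of '0'/'1' parses to v < 16
  let new_hex : List Char :=
    (PySem.List.pyRange 0 (new_bit_string.length : Int) 4).foldl
      (fun acc i =>
        acc ++ [Nat.digitChar ((PySem.Int.ofCharsBase?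
                  (PySem.List.slice new_bit_string (some i) (some (i + 4))) 2).getD 0).toNat]) []
  String.ofList (PySem.Chars.upper new_hex)

-- ===== PORT B =====
-- format(x, 'X') for 0 ≤ x < 16 (the only values a nibble takes)
def hexUpperDigit (v : Nat) : Char := (Nat.digitChar v).toUpper

def flip_bit_alt (hex_str : String) (position : Int) : String :=
  -- nibbles = [int(c, 16) for c in hex_str]
  let nibbles : List Nat := hex_str.toList.map pyHexVal
  -- nibbles[position // 4] ^= 1 << (3 - position % 4)
  let q : Int := PySem.Int.floordiv position 4
  let r : Int := PySem.Int.mod position 4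
  let nibbles' : List Nat :=
    match PySem.List.pyGet? nibbles q with
    | none => nibbles         -- IndexError: excluded by Pre_flip_bit
    | some v => PySem.List.pySetD nibbles q (v ^^^ (1 <<< (3 - r.toNat)))
  -- ''.join(format(x, 'X') for x in nibbles)
  String.ofList (nibbles'.map hexUpperDigit)

-- ===== PRECONDITION & SPEC =====
-- Pre: every character is a hex digit (else int(c,16) raises ValueError) and the bit position
-- is in range of the 4·len bit list (else IndexError).
def Pre_flip_bit (hex_str : String) (position : Int) : Prop :=
  hex_str.toList.all (fun c => c.isDigit || ('a' ≤ c && c ≤ 'f') || ('A' ≤ c && c ≤ 'F')) = true ∧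
  PySem.Raise.InRange (4 * hex_str.toList.length) position

instance (hex_str : String) (position : Int) : Decidable (Pre_flip_bit hex_str position) := by
  unfold Pre_flip_bit; infer_instance

def pvWitness_flip_bit : String × Int := ("2B", -3)

def Spec_flip_bit (hex_str : String) (position : Int) (out : String) : Prop := out = flip_bit_alt hex_str position
instance (hex_str : String) (position : Int) (out : String) : Decidable (Spec_flip_bit hex_str position out) := by unfold Spec_flip_bit; infer_instance

-- ===== CLAIM (what is proved, stated in full; the proofs are below) =====
def Claim_equal_flip_bit : Prop := ∀ (hex_str : String) (position : Int), Dom_flip_bit hex_str position → Pre_flip_bit hex_str position → Spec_flip_bit hex_str position (flip_bit hex_str position)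

-- ===== LEMMAS AND PROOFS =====

-- proof-side abbreviations
def bits4 (v : Nat) : List Char := PySem.Chars.zfill (PySem.Int.toBinChars (v : Int)) 4
def nibVal (l : List Char) : Nat := ((PySem.Int.ofCharsBase? l 2).getD 0).toNat
def flipC (c : Char) : Char := if c = '0' then '1' else '0'
-- the common canonical result: nibble values with bit i flipped
def canon (vs : List Nat) (i : Nat) : List Nat :=
  vs.set (i / 4) (vs.getD (i / 4) 0 ^^^ (1 <<< (3 - i % 4)))
-- the resolved (non-negative) bit index of `position`
def residx (n : Nat) (p : Int) : Nat := if p < 0 then (p + 4 * n).toNat else p.toNat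

lemma pyHexVal_lt (c : Char) (h : c.toNat ≤ 126) : pyHexVal c < 16 := by
  have key : ∀ m : Nat, m < 127 → ((PySem.Int.ofCharsBase? [Char.ofNat m] 16).getD 0).toNat < 16 := by decide
  have h2 := key c.toNat (by omega)
  rw [Char.ofNat_toNat] at h2
  simpa [pyHexVal] using h2

lemma bits4_len (v : Nat) (h : v < 16) : (bits4 v).length = 4 := by
  revert v h; decide

lemma nibVal_bits4 (v : Nat) (h : v < 16) : nibVal (bits4 v) = v := by
  revert v h; decide

lemma nibVal_flip (v r : Nat) (hv : v < 16) (hr : r < 4) :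
    nibVal ((bits4 v).set r (flipC ((bits4 v).getD r ' '))) = v ^^^ (1 <<< (3 - r)) := by
  have key : ∀ v : Nat, v < 16 → ∀ r : Nat, r < 4 →
      nibVal ((bits4 v).set r (flipC ((bits4 v).getD r ' '))) = v ^^^ (1 <<< (3 - r)) := by decide
  exact key v hv r hr

lemma xor_lt_16 (a b : Nat) (ha : a < 16) (hb : b < 16) : a ^^^ b < 16 := by
  have key : ∀ a : Nat, a < 16 → ∀ b : Nat, b < 16 → a ^^^ b < 16 := by decide
  exact key a ha b hb

lemma upperChar_digitChar (v : Nat) (h : v < 16) :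
    PySem.Chars.upperChar (Nat.digitChar v) = hexUpperDigit v := by
  revert v h; decide

lemma flatMap_len (vs : List Nat) (hv : ∀ v ∈ vs, v < 16) :
    (vs.flatMap bits4).length = 4 * vs.length := by
  induction vs with
  | nil => simp
  | cons v tl ih =>
    simp only [List.flatMap_cons, List.length_append, List.length_cons,
      bits4_len v (hv v (by simp)), ih (fun x hx => hv x (by simp [hx]))]
    ring

lemma pySetD_neg {α : Type} (xs : List α) {i : Int} (v : α) (h1 : i < 0)
    (h2 : -(xs.length : Int) ≤ i) :
    PySem.List.pySetD xs i v = xs.set (xs.length - (-i).toNat) v := by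
  have hidx : PySem.List.pyIdx? xs.length i = some (xs.length - (-i).toNat) := by
    unfold PySem.List.pyIdx?
    rw [if_neg (by omega), if_pos h2]
  simp [PySem.List.pySetD, PySem.List.pySet?, hidx]

-- unflipped chunking: reading the bit string back nibble by nibble recovers the values
lemma chunk_id (vs : List Nat) (hv : ∀ v ∈ vs, v < 16) :
    (List.range vs.length).map (fun k => nibVal (((vs.flatMap bits4).drop (4 * k)).take 4)) = vs := by
  induction vs with
  | nil => simp
  | cons v tl ih =>
    have h4 : (bits4 v).length = 4 := bits4_len v (hv v (by simp))
    have htl : ∀ x ∈ tl, x < 16 := fun x hx => hv x (by simp [hx])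
    simp only [List.length_cons, List.range_succ_eq_map, List.map_cons, List.map_map]
    refine congrArg₂ List.cons ?_ ?_
    · simpa [List.flatMap_cons, List.take_left' h4] using nibVal_bits4 v (hv v (by simp))
    · calc (List.range tl.length).map ((fun k => nibVal ((((v :: tl).flatMap bits4).drop (4 * k)).take 4)) ∘ Nat.succ)
          = (List.range tl.length).map (fun k => nibVal (((tl.flatMap bits4).drop (4 * k)).take 4)) := by
            refine List.map_congr_left (fun k _ => ?_)
            simp only [Function.comp_apply, List.flatMap_cons, List.drop_append, h4]
            have h1 : 4 * Nat.succ k = 4 + 4 * k := by omega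
            have h2 : 4 + 4 * k - 4 = 4 * k := by omega
            rw [h1, h2, show List.drop (4 + 4 * k) (bits4 v) = [] from
              List.drop_eq_nil_of_le (by omega), List.nil_append]
        _ = tl := ih htl

-- core: flipping bit i of the concatenated bit string and re-chunking = canon
lemma chunk_flip (vs : List Nat) (i : Nat) (hv : ∀ v ∈ vs, v < 16) (hi : i < 4 * vs.length) :
    (List.range vs.length).map (fun k =>
        nibVal ((((vs.flatMap bits4).set i (flipC ((vs.flatMap bits4).getD i ' '))).drop (4 * k)).take 4))
      = canon vs i := by
  induction vs generalizing i with
  | nil => simp at hi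
  | cons v tl ih =>
    have h4 : (bits4 v).length = 4 := bits4_len v (hv v (by simp))
    have htl : ∀ x ∈ tl, x < 16 := fun x hx => hv x (by simp [hx])
    by_cases hc : i < 4
    · -- flip lands in the head nibble
      have hset : ((v :: tl).flatMap bits4).set i (flipC (((v :: tl).flatMap bits4).getD i ' '))
          = (bits4 v).set i (flipC ((bits4 v).getD i ' ')) ++ tl.flatMap bits4 := by
        simp only [List.flatMap_cons]
        rw [List.getD, List.getElem?_append, if_pos (by omega), List.set_append, if_pos (by omega)]
        rfl
      rw [hset]
      have hlen' : ((bits4 v).set i (flipC ((bits4 v).getD i ' '))).length = 4 := by simp [h4]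
      simp only [List.length_cons, List.range_succ_eq_map, List.map_cons, List.map_map]
      have hcanon : canon (v :: tl) i = (v ^^^ (1 <<< (3 - i))) :: tl := by
        unfold canon
        rw [Nat.div_eq_of_lt hc, Nat.mod_eq_of_lt hc]
        rfl
      rw [hcanon]
      refine congrArg₂ List.cons ?_ ?_
      · simp only [show (4:Nat) * 0 = 0 from rfl, List.drop_zero, List.take_left' hlen']
        exact nibVal_flip v i (hv v (by simp)) hc
      · calc (List.range tl.length).map ((fun k => nibVal ((((bits4 v).set i (flipC ((bits4 v).getD i ' ')) ++ tl.flatMap bits4).drop (4 * k)).take 4)) ∘ Nat.succ)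
            = (List.range tl.length).map (fun k => nibVal (((tl.flatMap bits4).drop (4 * k)).take 4)) := by
              refine List.map_congr_left (fun k _ => ?_)
              simp only [Function.comp_apply, List.drop_append, hlen']
              have h1 : 4 * Nat.succ k = 4 + 4 * k := by omega
              have h2 : 4 + 4 * k - 4 = 4 * k := by omega
              rw [h1, h2, show List.drop (4 + 4 * k) ((bits4 v).set i (flipC ((bits4 v).getD i ' '))) = [] from
                List.drop_eq_nil_of_le (by simp [h4]), List.nil_append]
          _ = tl := chunk_id tl htl
    · -- flip lands in the tail
      set j := i - 4 with hj
      have hset : ((v :: tl).flatMap bits4).set i (flipC (((v :: tl).flatMap bits4).getD i ' '))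
          = bits4 v ++ (tl.flatMap bits4).set j (flipC ((tl.flatMap bits4).getD j ' ')) := by
        simp only [List.flatMap_cons]
        rw [List.getD, List.getElem?_append, if_neg (by omega), List.set_append, if_neg (by omega), h4]
        rfl
      rw [hset]
      simp only [List.length_cons, List.range_succ_eq_map, List.map_cons, List.map_map]
      have hcanon : canon (v :: tl) i = v :: canon tl j := by
        unfold canon
        have hdiv : i / 4 = j / 4 + 1 := by omega
        have hmod : i % 4 = j % 4 := by omega
        rw [hdiv, hmod]
        rfl
      rw [hcanon]
      refine congrArg₂ List.cons ?_ ?_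
      · simp only [show (4:Nat) * 0 = 0 from rfl, List.drop_zero, List.take_left' h4]
        exact nibVal_bits4 v (hv v (by simp))
      · calc (List.range tl.length).map ((fun k => nibVal (((bits4 v ++ (tl.flatMap bits4).set j (flipC ((tl.flatMap bits4).getD j ' '))).drop (4 * k)).take 4)) ∘ Nat.succ)
            = (List.range tl.length).map (fun k => nibVal ((((tl.flatMap bits4).set j (flipC ((tl.flatMap bits4).getD j ' '))).drop (4 * k)).take 4)) := by
              refine List.map_congr_left (fun k _ => ?_)
              simp only [Function.comp_apply, List.drop_append, h4]
              have h1 : 4 * Nat.succ k = 4 + 4 * k := by omega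
              have h2 : 4 + 4 * k - 4 = 4 * k := by omega
              rw [h1, h2, show List.drop (4 + 4 * k) (bits4 v) = [] from
                List.drop_eq_nil_of_le (by omega), List.nil_append]
          _ = canon tl j := ih j htl (by simp only [List.length_cons] at hi; omega)

-- A reduces to canon
lemma A_eq (s : String) (p : Int) (hv : ∀ c ∈ s.toList, pyHexVal c < 16)
    (hr : PySem.Raise.InRange (4 * s.toList.length) p) :
    flip_bit s p
      = String.ofList ((canon (s.toList.map pyHexVal) (residx s.toList.length p)).map
          (fun v => PySem.Chars.upperChar (Nat.digitChar v))) := by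
  have hvs : ∀ v ∈ s.toList.map pyHexVal, v < 16 := by
    intro v hvm
    rcases List.mem_map.mp hvm with ⟨c, hc, rfl⟩
    exact hv c hc
  have hflat : s.toList.foldl
      (fun acc c => acc ++ PySem.Chars.zfill (PySem.Int.toBinChars ((pyHexVal c : Nat) : Int)) 4) []
      = (s.toList.map pyHexVal).flatMap bits4 := by
    rw [PySem.List.foldl_append_eq_flatMap, List.nil_append, List.flatMap_map]
    rfl
  simp only [flip_bit]
  rw [hflat]
  obtain ⟨hr1, hr2⟩ := hr
  have hlen : (List.flatMap bits4 (List.map pyHexVal s.toList)).length = 4 * s.toList.length := by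
    rw [flatMap_len _ hvs, List.length_map]
  have hget : PySem.List.pyGet? (List.flatMap bits4 (List.map pyHexVal s.toList)) p
      = some ((List.flatMap bits4 (List.map pyHexVal s.toList)).getD (residx s.toList.length p) ' ') := by
    by_cases hp : 0 ≤ p
    · have hres : residx s.toList.length p = p.toNat := by unfold residx; rw [if_neg (by omega)]
      rw [PySem.List.pyGet?_of_nonneg _ hp, hres, List.getD_eq_getElem?_getD,
        List.getElem?_eq_getElem (by omega : p.toNat < (List.flatMap bits4 (List.map pyHexVal s.toList)).length)]
      rfl
    · have hp' : p < 0 := by omega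
      have hres : residx s.toList.length p = (p + 4 * s.toList.length).toNat := by
        unfold residx; rw [if_pos hp']
      rw [PySem.List.pyGet?_neg _ hp' (by omega), hres, List.getD_eq_getElem?_getD,
        show (List.flatMap bits4 (List.map pyHexVal s.toList)).length - (-p).toNat
          = (p + 4 * s.toList.length).toNat from by omega,
        List.getElem?_eq_getElem (by omega : (p + 4 * s.toList.length).toNat < (List.flatMap bits4 (List.map pyHexVal s.toList)).length)]
      rfl
  have hsetD : PySem.List.pySetD (List.flatMap bits4 (List.map pyHexVal s.toList)) p
        (if (List.flatMap bits4 (List.map pyHexVal s.toList)).getD (residx s.toList.length p) ' ' = '0' then '1' else '0')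
      = (List.flatMap bits4 (List.map pyHexVal s.toList)).set (residx s.toList.length p)
        (flipC ((List.flatMap bits4 (List.map pyHexVal s.toList)).getD (residx s.toList.length p) ' ')) := by
    by_cases hp : 0 ≤ p
    · have hres : residx s.toList.length p = p.toNat := by unfold residx; rw [if_neg (by omega)]
      rw [PySem.List.pySetD_of_nonneg _ _ hp, hres]
      rfl
    · have hp' : p < 0 := by omega
      have hres : residx s.toList.length p = (p + 4 * s.toList.length).toNat := by
        unfold residx; rw [if_pos hp']
      rw [pySetD_neg _ _ hp' (by omega), hres,
        show (List.flatMap bits4 (List.map pyHexVal s.toList)).length - (-p).toNat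
          = (p + 4 * s.toList.length).toNat from by omega]
      rfl
  rw [hget]
  simp only [hsetD]
  have hilt : residx s.toList.length p < 4 * s.toList.length := by
    unfold residx; split <;> omega
  set vs := List.map pyHexVal s.toList with hvsd
  set bl := List.flatMap bits4 vs with hbld
  set i := residx s.toList.length p with hid
  set L' := bl.set i (flipC (bl.getD i ' ')) with hLd
  have hlen' : L'.length = 4 * s.toList.length := by rw [hLd, List.length_set, hlen]
  rw [hlen', PySem.List.foldl_append_singleton_eq_map, List.nil_append,
    PySem.List.pyRange_of_pos 0 _ (by norm_num)]
  have hm : (if (0:Int) < ((4 * s.toList.length : Nat):Int)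
      then ((((4 * s.toList.length : Nat):Int) - 0 + 4 - 1)/4).toNat else 0) = s.toList.length := by
    split <;> omega
  rw [hm, List.map_map]
  refine congrArg String.ofList ?_
  have hchunk := chunk_flip vs i hvs (by rw [hvsd, List.length_map]; exact hilt)
  rw [show PySem.Chars.upper = List.map PySem.Chars.upperChar from rfl, List.map_map, ← hchunk,
    List.map_map, hvsd, List.length_map]
  refine List.map_congr_left (fun k _ => ?_)
  simp only [Function.comp_apply]
  have e1 : (0:Int) + 4 * (k:Int) = ((4*k : Nat):Int) := by push_cast; ring
  have e2 : ((4*k : Nat):Int) + 4 = ((4*k+4 : Nat):Int) := by push_cast; ring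
  rw [e1, e2, PySem.List.slice_natCast, show 4*k+4-4*k = 4 from by omega]
  simp only [nibVal, hLd, hbld, hvsd]

-- B reduces to canon
lemma B_eq (s : String) (p : Int)
    (hr : PySem.Raise.InRange (4 * s.toList.length) p) :
    flip_bit_alt s p
      = String.ofList ((canon (s.toList.map pyHexVal) (residx s.toList.length p)).map hexUpperDigit) := by
  obtain ⟨hr1, hr2⟩ := hr
  have hvl : (List.map pyHexVal s.toList).length = s.toList.length := List.length_map ..
  have hilt : residx s.toList.length p < 4 * s.toList.length := by
    unfold residx; split <;> omega
  simp only [flip_bit_alt]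
  rw [PySem.Int.floordiv_eq_ediv_of_pos (by norm_num), PySem.Int.mod_eq_emod_of_pos (by norm_num)]
  have hq : PySem.List.pyGet? (List.map pyHexVal s.toList) (p / 4)
      = some ((List.map pyHexVal s.toList).getD (residx s.toList.length p / 4) 0) := by
    by_cases hp : 0 ≤ p
    · have hres : residx s.toList.length p / 4 = (p / 4).toNat := by
        unfold residx; rw [if_neg (by omega)]; omega
      rw [PySem.List.pyGet?_of_nonneg _ (by omega : 0 ≤ p / 4), hres, List.getD_eq_getElem?_getD,
        List.getElem?_eq_getElem (by omega : (p / 4).toNat < (List.map pyHexVal s.toList).length)]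
      rfl
    · have hp' : p < 0 := by omega
      have hq' : p / 4 < 0 := by omega
      have hres : (List.map pyHexVal s.toList).length - (-(p / 4)).toNat
          = residx s.toList.length p / 4 := by
        unfold residx; rw [if_pos hp']; omega
      rw [PySem.List.pyGet?_neg _ hq' (by omega), hres, List.getD_eq_getElem?_getD,
        List.getElem?_eq_getElem (by omega : residx s.toList.length p / 4 < (List.map pyHexVal s.toList).length)]
      rfl
  have hrmod : (p % 4).toNat = residx s.toList.length p % 4 := by
    unfold residx; split <;> omega
  have hsetD : PySem.List.pySetD (List.map pyHexVal s.toList) (p / 4)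
        ((List.map pyHexVal s.toList).getD (residx s.toList.length p / 4) 0 ^^^ (1 <<< (3 - (p % 4).toNat)))
      = (List.map pyHexVal s.toList).set (residx s.toList.length p / 4)
        ((List.map pyHexVal s.toList).getD (residx s.toList.length p / 4) 0 ^^^ (1 <<< (3 - (p % 4).toNat))) := by
    by_cases hp : 0 ≤ p
    · have hres : (p / 4).toNat = residx s.toList.length p / 4 := by
        unfold residx; rw [if_neg (by omega)]; omega
      rw [PySem.List.pySetD_of_nonneg _ _ (by omega : 0 ≤ p / 4), hres]
    · have hp' : p < 0 := by omega
      have hq' : p / 4 < 0 := by omega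
      have hres : (List.map pyHexVal s.toList).length - (-(p / 4)).toNat
          = residx s.toList.length p / 4 := by
        unfold residx; rw [if_pos hp']; omega
      rw [pySetD_neg _ _ hq' (by omega), hres]
  rw [hq]
  simp only [hsetD]
  simp only [hrmod, canon]

lemma canon_lt (vs : List Nat) (i : Nat) (hv : ∀ v ∈ vs, v < 16) :
    ∀ x ∈ canon vs i, x < 16 := by
  intro x hx
  rcases List.mem_or_eq_of_mem_set hx with h | h
  · exact hv x h
  · subst h
    refine xor_lt_16 _ _ ?_ ?_
    · rcases Nat.lt_or_ge (i / 4) vs.length with hlt | hge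
      · rw [List.getD_eq_getElem vs 0 hlt]; exact hv _ (List.getElem_mem hlt)
      · rw [List.getD_eq_default vs 0 hge]; omega
    · have h3 : 3 - i % 4 = 0 ∨ 3 - i % 4 = 1 ∨ 3 - i % 4 = 2 ∨ 3 - i % 4 = 3 := by omega
      rcases h3 with h | h | h | h <;> rw [h] <;> decide
      

-- ===== VERDICT (by name: the statement is the Claim_ definition above) =====
theorem flip_bit_spec : Claim_equal_flip_bit := by
  intro s p hdom hpre
  unfold Spec_flip_bit
  obtain ⟨hhex, hr⟩ := hpre
  have hv : ∀ c ∈ s.toList, pyHexVal c < 16 := by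
    intro c hc
    have hd : pvDomChar c = true := by
      unfold Dom_flip_bit at hdom
      simp only [Bool.and_eq_true, pvDomStr, List.all_eq_true] at hdom
      exact hdom.1 c hc
    unfold pvDomChar at hd
    apply pyHexVal_lt
    simp only [Bool.or_eq_true, Bool.and_eq_true, decide_eq_true_eq, beq_iff_eq] at hd
    omega
  rw [A_eq s p hv hr, B_eq s p hr]
  congr 1
  refine List.map_congr_left (fun v hvmem => ?_)
  exact upperChar_digitChar v (canon_lt _ _ (by simpa using fun c hc => hv c hc) v hvmem)
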